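-- pv_equiv track=rewrite | github.com/qoxmfaktmxj/qoxmfaktmxj.github.io | scripts/import_naver_blog.py | convert_indented_code_to_fenced
-- ===== SOURCE A (Python) =====
-- def convert_indented_code_to_fenced(text: str) -> str:
--     """Convert 4-space indented code blocks to fenced code blocks for mobile readability."""
--     lines = text.split("\n")
--     result: list[str] = []
--     code_lines: list[str] = []
--     in_code = False
--
--     for line in lines:
--         is_code_line = line.startswith("    ") and line.strip()
--         is_blank = not line.strip()
--
--         if is_code_line:
--             if not in_code:
--                 in_code = True
--                 code_lines = []
--             code_lines.append(line[4:])
--         elif is_blank and in_code: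
--             code_lines.append("")
--         else:
--             if in_code:
--                 # Remove trailing blank lines from code block
--                 while code_lines and not code_lines[-1].strip():
--                     code_lines.pop()
--                 if code_lines:
--                     result.append("```")
--                     result.extend(code_lines)
--                     result.append("```")
--                 in_code = False
--                 code_lines = []
--             result.append(line)
--
--     if in_code and code_lines:
--         while code_lines and not code_lines[-1].strip():
--             code_lines.pop()
--         if code_lines:
--             result.append("```")
--             result.extend(code_lines)
--             result.append("```")
--
--     return "\n".join(result)
-- ===== SOURCE B (Python) =====
-- def convert_indented_code_to_fenced(text: str) -> str:
--     """Convert 4-space indented code blocks to fenced code blocks for mobile readability."""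
--     lines = text.split("\n")
--     out: list[str] = []
--     i = 0
--     n = len(lines)
--     while i < n:
--         line = lines[i]
--         if line.startswith("    ") and line.strip():
--             block: list[str] = []
--             while i < n and (
--                 (lines[i].startswith("    ") and lines[i].strip()) or not lines[i].strip()
--             ):
--                 if lines[i].startswith("    ") and lines[i].strip():
--                     block.append(lines[i][4:])
--                 else:
--                     block.append("")
--                 i += 1
--             while block and not block[-1].strip():
--                 block.pop()
--             if block:
--                 out.append("```")
--                 out.extend(block)
--                 out.append("```")
--         else:
--             out.append(line)
--             i += 1
--     return "\n".join(out)
-- ===== Notes on version B (the rewrite author's own statement) =====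
-- stated objective: alternative
-- what changed: Replaces the carry-a-flag state machine (in_code/code_lines threaded through one for-loop plus a post-loop flush) with an index-driven outer while loop that, on seeing a code line, runs an inner loop collecting the whole block (code and blank lines) and emits it fenced immediately, so no state crosses iterations and no final flush exists.
import Mathlib
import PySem

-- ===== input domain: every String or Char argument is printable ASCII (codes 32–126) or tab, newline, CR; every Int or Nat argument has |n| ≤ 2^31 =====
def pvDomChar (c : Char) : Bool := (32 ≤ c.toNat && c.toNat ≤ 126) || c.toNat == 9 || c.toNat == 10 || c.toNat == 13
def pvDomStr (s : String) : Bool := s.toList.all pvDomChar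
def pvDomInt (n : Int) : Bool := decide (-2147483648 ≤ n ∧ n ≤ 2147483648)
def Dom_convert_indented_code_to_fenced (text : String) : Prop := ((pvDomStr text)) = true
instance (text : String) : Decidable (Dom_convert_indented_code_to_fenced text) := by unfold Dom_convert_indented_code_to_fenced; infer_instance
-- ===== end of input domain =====

-- B replaces A's carry-a-flag streaming state machine with an index-style outer loop that
-- collects each whole indented block in an inner loop and emits it fenced at once (objective: alternative).
-- Lines are handled as List Char (PySem.Chars gives the exact Python string semantics).

-- ===== PORT A =====

-- `line.startswith("    ") and line.strip()` truthiness
def pvIsCode (l : List Char) : Bool :=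
  PySem.Chars.startswith l [' ', ' ', ' ', ' '] && !(PySem.Chars.strip l == [])
-- `not line.strip()`
def pvIsBlank (l : List Char) : Bool := PySem.Chars.strip l == []

-- `while code_lines and not code_lines[-1].strip(): code_lines.pop()`
def pvPopTrail : List (List Char) → List (List Char)
  | [] => []
  | x :: cl =>
    if PySem.Chars.strip ((x :: cl).getLastD []) == [] then pvPopTrail (x :: cl).dropLast
    else x :: cl
termination_by cl => cl.length
decreasing_by simp

-- one iteration of A's for-loop; state = (result, code_lines, in_code)
def pvStepA (s : List (List Char) × List (List Char) × Bool) (line : List Char) :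
    List (List Char) × List (List Char) × Bool :=
  let result := s.1
  let code_lines := s.2.1
  let in_code := s.2.2
  if pvIsCode line then
    let code_lines := if !in_code then [] else code_lines
    (result, code_lines ++ [PySem.Chars.slice line (some 4) none], true)
  else if pvIsBlank line && in_code then
    (result, code_lines ++ [[]], true)
  else
    let result :=
      if in_code then
        let cl := pvPopTrail code_lines
        if cl = [] then result else result ++ [['`', '`', '`']] ++ cl ++ [['`', '`', '`']]
      else result
    (result ++ [line], [], false)

-- the post-loop flush `if in_code and code_lines: …`
def pvFinishA (s : List (List Char) × List (List Char) × Bool) : List (List Char) :=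
  if s.2.2 && !(s.2.1 = []) then
    let cl := pvPopTrail s.2.1
    if cl = [] then s.1 else s.1 ++ [['`', '`', '`']] ++ cl ++ [['`', '`', '`']]
  else s.1

def convert_indented_code_to_fenced (text : String) : String :=
  let lines := PySem.Chars.splitOn text.toList ['\n']
  String.ofList (PySem.Chars.join ['\n'] (pvFinishA (lines.foldl pvStepA ([], [], false))))

-- ===== PORT B =====

-- inner while loop: collect the block's entries, return (block, remaining lines)
def pvCollectB : List (List Char) → List (List Char) × List (List Char)
  | [] => ([], [])
  | l :: ls =>
    if pvIsCode l || pvIsBlank l then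
      let p := pvCollectB ls
      ((if pvIsCode l then PySem.Chars.slice l (some 4) none else []) :: p.1, p.2)
    else ([], l :: ls)

theorem pvCollectB_snd_length_le : ∀ ls : List (List Char), (pvCollectB ls).2.length ≤ ls.length
  | [] => by simp [pvCollectB]
  | l :: ls => by
    simp only [pvCollectB]
    split
    · exact Nat.le_trans (pvCollectB_snd_length_le ls) (Nat.le_succ _)
    · simp

-- outer while loop over the line index
def pvGoB : List (List Char) → List (List Char)
  | [] => []
  | l :: ls =>
    if _h : pvIsCode l = true then
      let p := pvCollectB (l :: ls)
      (let b := pvPopTrail p.1; if b = [] then [] else [['`', '`', '`']] ++ b ++ [['`', '`', '`']])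
        ++ pvGoB p.2
    else l :: pvGoB ls
termination_by ls => ls.length
decreasing_by
  · simp only [pvCollectB, _h, Bool.true_or, if_true]
    exact Nat.lt_succ_of_le (pvCollectB_snd_length_le ls)
  · simp

def convert_indented_code_to_fenced_alt (text : String) : String :=
  String.ofList (PySem.Chars.join ['\n'] (pvGoB (PySem.Chars.splitOn text.toList ['\n'])))

-- ===== PRECONDITION & SPEC =====
def Spec_convert_indented_code_to_fenced (text : String) (out : String) : Prop := out = convert_indented_code_to_fenced_alt text
instance (text : String) (out : String) : Decidable (Spec_convert_indented_code_to_fenced text out) := by unfold Spec_convert_indented_code_to_fenced; infer_instance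

-- ===== CLAIM (what is proved, stated in full; the proofs are below) =====
def Claim_equal_convert_indented_code_to_fenced : Prop := ∀ (text : String), Dom_convert_indented_code_to_fenced text → Spec_convert_indented_code_to_fenced text (convert_indented_code_to_fenced text)

-- ===== LEMMAS AND PROOFS =====

def pvEmit (cl : List (List Char)) : List (List Char) :=
  if cl = [] then [] else [['`', '`', '`']] ++ cl ++ [['`', '`', '`']]

theorem pvGoB_cons_code (l : List Char) (ls : List (List Char)) (h : pvIsCode l = true) :
    pvGoB (l :: ls) =
      pvEmit (pvPopTrail (pvCollectB (l :: ls)).1) ++ pvGoB (pvCollectB (l :: ls)).2 := by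
  rw [pvGoB]; simp [h, pvEmit]

theorem pvGoB_cons_other (l : List Char) (ls : List (List Char)) (h : ¬ pvIsCode l = true) :
    pvGoB (l :: ls) = l :: pvGoB ls := by
  rw [pvGoB]; simp [h]

-- joint invariant: A's loop from the in-code / not-in-code states, expressed through B's two loops
theorem pvMain : ∀ ls : List (List Char),
    (∀ res cl, pvFinishA (ls.foldl pvStepA (res, cl, true)) =
        res ++ pvEmit (pvPopTrail (cl ++ (pvCollectB ls).1)) ++ pvGoB (pvCollectB ls).2) ∧
    (∀ res cl, pvFinishA (ls.foldl pvStepA (res, cl, false)) = res ++ pvGoB ls) := by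
  intro ls
  induction ls with
  | nil =>
    constructor
    · intro res cl
      simp only [List.foldl, pvCollectB, pvFinishA, pvGoB, pvEmit, List.append_nil]
      by_cases h : cl = []
      · subst h; simp [pvPopTrail]
      · simp only [h]
        split_ifs <;> simp_all
    · intro res cl; simp [pvFinishA, pvGoB]
  | cons l ls ih =>
    obtain ⟨ihT, ihF⟩ := ih
    constructor
    · -- in_code = true
      intro res cl
      by_cases hc : pvIsCode l = true
      · have : pvStepA (res, cl, true) l =
            (res, cl ++ [PySem.Chars.slice l (some 4) none], true) := by
          simp [pvStepA, hc]
        rw [List.foldl_cons, this, ihT]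
        simp only [pvCollectB, hc, Bool.true_or, if_true, List.append_assoc, List.cons_append,
          List.nil_append]
      · by_cases hb : pvIsBlank l = true
        · have : pvStepA (res, cl, true) l = (res, cl ++ [[]], true) := by
            simp [pvStepA, hc, hb]
          rw [List.foldl_cons, this, ihT]
          simp only [pvCollectB, hc, hb, Bool.or_true, if_true, List.append_assoc,
            List.cons_append, List.nil_append]
          simp
        · have : pvStepA (res, cl, true) l =
              (res ++ pvEmit (pvPopTrail cl) ++ [l], [], false) := by
            simp only [pvStepA, hc, hb, pvEmit]
            split_ifs <;> simp_all
          rw [List.foldl_cons, this, ihF]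
          have hcol : pvCollectB (l :: ls) = ([], l :: ls) := by
            simp [pvCollectB, hc, hb]
          rw [hcol]
          simp [pvGoB_cons_other l ls hc, pvEmit]
    · -- in_code = false
      intro res cl
      by_cases hc : pvIsCode l = true
      · have : pvStepA (res, cl, false) l =
            (res, [PySem.Chars.slice l (some 4) none], true) := by
          simp [pvStepA, hc]
        rw [List.foldl_cons, this, ihT, pvGoB_cons_code l ls hc]
        simp only [pvCollectB, hc, Bool.true_or, if_true, List.singleton_append]
        rw [List.append_assoc]
      · have : pvStepA (res, cl, false) l = (res ++ [l], [], false) := by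
          simp [pvStepA, hc]
        rw [List.foldl_cons, this, ihF, pvGoB_cons_other l ls hc]
        simp

-- ===== VERDICT (by name: the statement is the Claim_ definition above) =====
theorem convert_indented_code_to_fenced_spec : Claim_equal_convert_indented_code_to_fenced := by
  intro text _
  unfold Spec_convert_indented_code_to_fenced convert_indented_code_to_fenced convert_indented_code_to_fenced_alt
  simp only []
  rw [(pvMain (PySem.Chars.splitOn text.toList ['\n'])).2 [] []]
  simp
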